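-- pv_equiv track=rewrite | github.com/HHolte/apps-trondheim-academic | dojo/04-advent-of-code-2023/solutions/day3/part_a_hakon.py | get_numbers_and_symbols
-- ===== SOURCE A (Python) =====
-- def get_numbers_and_symbols(length_of_line, line):
--     numbers = []
--     indices = []
--     symbol_indices = []
--     number = ""
--     for index in range(length_of_line):
--         if line[index].isdigit():
--             number += line[index]
--         else:
--             if line[index] != ".":
--                 symbol_indices.append(index)
--             if len(number) > 0:
--                 numbers.append(number)
--                 indices.append(index - len(number))
--                 number = ""
--         if index == length_of_line - 1 and len(number) > 0:
--             numbers.append(number)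
--             indices.append(index - len(number) + 1)
--
--     return numbers, indices, symbol_indices
-- ===== SOURCE B (Python) =====
-- def get_numbers_and_symbols(length_of_line, line):
--     chars = [line[i] for i in range(length_of_line)]
--     numbers, indices, symbol_indices = [], [], []
--     n = len(chars)
--     i = 0
--     while i < n:
--         if chars[i].isdigit():
--             j = i
--             while j < n and chars[j].isdigit():
--                 j += 1
--             numbers.append(''.join(chars[i:j]))
--             indices.append(i)
--             i = j
--         else:
--             if chars[i] != '.':
--                 symbol_indices.append(i)
--             i += 1
--     return numbers, indices, symbol_indices
-- ===== Notes on version B (the rewrite author's own statement) =====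
-- stated objective: alternative
-- what changed: B first materializes the characters, then scans them with a two-level run scanner (an inner while loop consuming each whole digit run at once and slicing it out), instead of A's single pass with a pending-number accumulator and an explicit end-of-line flush branch.
import Mathlib
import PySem

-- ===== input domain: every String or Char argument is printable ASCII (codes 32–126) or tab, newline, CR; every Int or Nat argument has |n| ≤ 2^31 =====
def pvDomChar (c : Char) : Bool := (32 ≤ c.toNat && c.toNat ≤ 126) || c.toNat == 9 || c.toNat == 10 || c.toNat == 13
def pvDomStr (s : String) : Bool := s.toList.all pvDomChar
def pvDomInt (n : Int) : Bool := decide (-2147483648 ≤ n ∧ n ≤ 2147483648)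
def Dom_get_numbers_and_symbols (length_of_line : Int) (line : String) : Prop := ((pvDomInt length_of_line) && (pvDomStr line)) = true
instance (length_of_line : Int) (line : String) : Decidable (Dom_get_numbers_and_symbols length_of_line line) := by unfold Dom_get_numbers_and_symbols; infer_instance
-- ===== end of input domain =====

-- B replaces A's pending-number accumulator and end-of-line flush branch by a run scanner
-- that consumes each whole digit run with an inner search and slices it out (objective: alternative).


-- ===== PORT A =====
-- one iteration of A's loop body, given the character already read from the line
def gnsStepAChar (length_of_line : Int)
    (st : List String × List Int × List Int × List Char) (index : Int) (c : Char) :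
    List String × List Int × List Int × List Char :=
  let (numbers, indices, symbol_indices, number) := st
  let (numbers, indices, symbol_indices, number) :=
    if PySem.Chars.isdigit c then
      (numbers, indices, symbol_indices, number ++ [c])
    else
      let symbol_indices := if c ≠ '.' then symbol_indices ++ [index] else symbol_indices
      if number.length > 0 then
        (numbers ++ [String.mk number], indices ++ [index - (number.length : Int)], symbol_indices,
          ([] : List Char))
      else
        (numbers, indices, symbol_indices, number)
  if index = length_of_line - 1 ∧ number.length > 0 then
    (numbers ++ [String.mk number], indices ++ [index - (number.length : Int) + 1], symbol_indices,
      number)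
  else
    (numbers, indices, symbol_indices, number)

-- A's loop body: read line[index] (in range under Pre_), then process it
def gnsStepA (length_of_line : Int) (cs : List Char)
    (st : List String × List Int × List Int × List Char) (index : Int) :
    List String × List Int × List Int × List Char :=
  gnsStepAChar length_of_line st index ((PySem.List.pyGet? cs index).getD ' ')

def get_numbers_and_symbols (length_of_line : Int) (line : String) :
    List String × List Int × List Int :=
  let st := (PySem.List.pyRange 0 length_of_line 1).foldl (gnsStepA length_of_line line.toList)
    ([], [], [], [])
  (st.1, st.2.1, st.2.2.1)

-- ===== PORT B =====
-- Source B's inner loop 'while j < n and chars[j].isdigit(): j += 1'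
-- (fuel is a structural-termination artefact; chars.length - j steps always suffice)
def gnsDigitEnd (fuel : Nat) (chars : List Char) (j : Nat) : Nat :=
  match fuel with
  | 0 => j
  | fuel + 1 =>
    if h : j < chars.length then
      if PySem.Chars.isdigit (chars[j]'h) then gnsDigitEnd fuel chars (j + 1) else j
    else j

-- Source B's outer loop 'while i < n' as recursion on i (fuel ≥ chars.length - i suffices)
def gnsGo (fuel : Nat) (chars : List Char) (i : Nat) : List String × List Int × List Int :=
  match fuel with
  | 0 => ([], [], [])
  | fuel + 1 =>
    if h : i < chars.length then
      if PySem.Chars.isdigit (chars[i]'h) then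
        let j := gnsDigitEnd (chars.length - i) chars i
        let rest := gnsGo fuel chars j
        (String.mk ((chars.drop i).take (j - i)) :: rest.1, (i : Int) :: rest.2.1, rest.2.2)
      else
        let rest := gnsGo fuel chars (i + 1)
        if chars[i]'h ≠ '.' then (rest.1, rest.2.1, (i : Int) :: rest.2.2) else rest
    else ([], [], [])

def get_numbers_and_symbols_alt (length_of_line : Int) (line : String) :
    List String × List Int × List Int :=
  let chars := (PySem.List.pyRange 0 length_of_line 1).map
    (fun i => (PySem.List.pyGet? line.toList i).getD ' ')
  gnsGo chars.length chars 0

-- ===== PRECONDITION & SPEC =====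
-- Pre_: A raises IndexError (on line[index]) exactly when length_of_line exceeds len(line)
def Pre_get_numbers_and_symbols (length_of_line : Int) (line : String) : Prop :=
  length_of_line ≤ (line.toList.length : Int)
instance (length_of_line : Int) (line : String) :
    Decidable (Pre_get_numbers_and_symbols length_of_line line) := by
  unfold Pre_get_numbers_and_symbols; infer_instance

def pvWitness_get_numbers_and_symbols : Int × String := (7, "1.+23*.")

def Spec_get_numbers_and_symbols (length_of_line : Int) (line : String) (out : List String × List Int × List Int) : Prop := out = get_numbers_and_symbols_alt length_of_line line
instance (length_of_line : Int) (line : String) (out : List String × List Int × List Int) : Decidable (Spec_get_numbers_and_symbols length_of_line line out) := by unfold Spec_get_numbers_and_symbols; infer_instance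

-- ===== CLAIM (what is proved, stated in full; the proofs are below) =====
def Claim_equal_get_numbers_and_symbols : Prop := ∀ (length_of_line : Int) (line : String), Dom_get_numbers_and_symbols length_of_line line → Pre_get_numbers_and_symbols length_of_line line → Spec_get_numbers_and_symbols length_of_line line (get_numbers_and_symbols length_of_line line)

-- ===== LEMMAS AND PROOFS =====

-- reference scanner with a pending digit prefix 'num' (proof-only)
def pendScan : List Char → Int → List Char → List String × List Int × List Int
  | [], pos, num =>
    if num.length > 0 then ([String.mk num], [pos - (num.length : Int)], []) else ([], [], [])
  | c :: rest, pos, num =>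
    if PySem.Chars.isdigit c then pendScan rest (pos + 1) (num ++ [c])
    else
      let out := pendScan rest (pos + 1) []
      let out := if num.length > 0 then
          (String.mk num :: out.1, (pos - (num.length : Int)) :: out.2.1, out.2.2)
        else out
      if c ≠ '.' then (out.1, out.2.1, pos :: out.2.2) else out

-- A's loop restated as recursion on the remaining characters
def foldASuf (L : Int) : List Char → Int → List String × List Int × List Int × List Char →
    List String × List Int × List Int × List Char
  | [], _, st => st
  | c :: rest, pos, st => foldASuf L rest (pos + 1) (gnsStepAChar L st pos c)

theorem foldASuf_eq_pendScan (L : Int) (suffix : List Char) :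
    ∀ (pos : Int) (ns : List String) (is ss : List Int) (num : List Char),
    pos + (suffix.length : Int) = L → (suffix = [] → num = []) →
    (fun st : List String × List Int × List Int × List Char => (st.1, st.2.1, st.2.2.1))
        (foldASuf L suffix pos (ns, is, ss, num)) =
      (ns ++ (pendScan suffix pos num).1, is ++ (pendScan suffix pos num).2.1,
        ss ++ (pendScan suffix pos num).2.2) := by
  induction suffix with
  | nil =>
    intro pos ns is ss num _ hnum
    simp [foldASuf, pendScan, hnum rfl]
  | cons c rest ih =>
    intro pos ns is ss num hpos _
    have hunf : foldASuf L (c :: rest) pos (ns, is, ss, num) =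
        foldASuf L rest (pos + 1) (gnsStepAChar L (ns, is, ss, num) pos c) := rfl
    by_cases hd : PySem.Chars.isdigit c
    · rcases rest with _ | ⟨c2, rest2⟩
      · have hposL : pos = L - 1 := by simp at hpos; omega
        have hstep : gnsStepAChar L (ns, is, ss, num) pos c =
            (ns ++ [String.mk (num ++ [c])], is ++ [pos - ((num ++ [c]).length : Int) + 1], ss,
              num ++ [c]) := by
          simp [gnsStepAChar, hd, hposL]
        rw [hunf, hstep]
        simp [foldASuf, pendScan, hd]
        omega
      · have hposL : ¬ pos = L - 1 := by simp at hpos ⊢; omega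
        have hstep : gnsStepAChar L (ns, is, ss, num) pos c = (ns, is, ss, num ++ [c]) := by
          simp [gnsStepAChar, hd, hposL]
        rw [hunf, hstep,
          ih (pos + 1) ns is ss (num ++ [c]) (by simp at hpos ⊢; omega) (by simp)]
        simp [pendScan, hd]
    · by_cases hn : num.length > 0
      · have hstep : gnsStepAChar L (ns, is, ss, num) pos c =
            (ns ++ [String.mk num], is ++ [pos - (num.length : Int)],
              (if c ≠ '.' then ss ++ [pos] else ss), ([] : List Char)) := by
          simp [gnsStepAChar, hd, hn]
        rw [hunf, hstep,
          ih (pos + 1) (ns ++ [String.mk num]) (is ++ [pos - (num.length : Int)])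
            (if c ≠ '.' then ss ++ [pos] else ss) [] (by simp at hpos ⊢; omega) (fun _ => rfl)]
        by_cases hc : c = '.'
        · subst hc; simp [pendScan, hd, hn]
        · simp [pendScan, hd, hn, hc]
      · have hnum0 : num = [] := by simpa using hn
        subst hnum0
        have hstep : gnsStepAChar L (ns, is, ss, []) pos c =
            (ns, is, (if c ≠ '.' then ss ++ [pos] else ss), ([] : List Char)) := by
          simp [gnsStepAChar, hd]
        rw [hunf, hstep,
          ih (pos + 1) ns is (if c ≠ '.' then ss ++ [pos] else ss) []
            (by simp at hpos ⊢; omega) (fun _ => rfl)]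
        by_cases hc : c = '.'
        · subst hc; simp [pendScan, hd]
        · simp [pendScan, hd, hc]

-- A's foldl over the index range equals foldASuf over the materialized prefix
theorem foldl_eq_foldASuf (L : Int) (cs : List Char) (hL : L ≤ (cs.length : Int)) :
    ∀ (d k : Nat) (st : List String × List Int × List Int × List Char),
    L ≤ (k : Int) + (d : Int) →
    (PySem.List.pyRange (k : Int) L 1).foldl (gnsStepA L cs) st =
      foldASuf L ((cs.take L.toNat).drop k) (k : Int) st := by
  have hLnat : L.toNat ≤ cs.length := by omega
  intro d
  induction d with
  | zero =>
    intro k st hk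
    rw [PySem.List.pyRange_one_eq_nil (by omega)]
    rw [List.drop_eq_nil_of_le (by rw [List.length_take]; omega)]
    rfl
  | succ d ih =>
    intro k st hk
    by_cases hlt : (k : Int) < L
    · have hklen : k < L.toNat := by omega
      have hkcs : k < cs.length := by omega
      rw [PySem.List.pyRange_one_cons hlt]
      simp only [List.foldl_cons]
      have hget : (PySem.List.pyGet? cs (k : Int)).getD ' ' = cs[k]'hkcs := by
        rw [PySem.List.pyGet?_natCast]
        simp [List.getElem?_eq_getElem hkcs]
      have hstep : gnsStepA L cs st (k : Int) = gnsStepAChar L st (k : Int) (cs[k]'hkcs) := by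
        rw [gnsStepA, hget]
      have hdrop : (cs.take L.toNat).drop k =
          cs[k]'hkcs :: (cs.take L.toNat).drop (k + 1) := by
        rw [List.drop_eq_getElem_cons (by rw [List.length_take]; omega)]
        simp [List.getElem_take]
      have hfold : foldASuf L ((cs.take L.toNat).drop k) (k : Int) st =
          foldASuf L ((cs.take L.toNat).drop (k + 1)) ((k : Int) + 1)
            (gnsStepAChar L st (k : Int) (cs[k]'hkcs)) := by
        rw [hdrop]
        rfl
      rw [hfold, ← hstep]
      rw [show ((k : Int) + 1) = ((k + 1 : Nat) : Int) by push_cast; ring]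
      exact ih (k + 1) (gnsStepA L cs st (k : Int)) (by push_cast at hk ⊢; omega)
    · rw [PySem.List.pyRange_one_eq_nil (by omega)]
      rw [List.drop_eq_nil_of_le (by rw [List.length_take]; omega)]
      rfl

-- properties of gnsDigitEnd
theorem gnsDigitEnd_ge (fuel : Nat) : ∀ (chars : List Char) (k : Nat),
    k ≤ gnsDigitEnd fuel chars k := by
  induction fuel with
  | zero => intro chars k; simp [gnsDigitEnd]
  | succ fuel ih =>
    intro chars k
    rw [gnsDigitEnd]
    by_cases hk : k < chars.length
    · by_cases hd : PySem.Chars.isdigit (chars[k]'hk)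
      · simp only [hk, dite_true, hd, if_true]
        have := ih chars (k + 1); omega
      · simp [hk, hd]
    · simp [hk]

theorem gnsDigitEnd_gt (fuel : Nat) (chars : List Char) (k : Nat) (hk : k < chars.length)
    (hd : PySem.Chars.isdigit (chars[k]'hk)) (hf : 0 < fuel) :
    k < gnsDigitEnd fuel chars k := by
  rcases fuel with _ | fuel
  · omega
  · rw [gnsDigitEnd]
    simp only [hk, dite_true, hd, if_true]
    have := gnsDigitEnd_ge fuel chars (k + 1); omega

theorem gnsDigitEnd_le (fuel : Nat) : ∀ (chars : List Char) (k : Nat), k ≤ chars.length →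
    gnsDigitEnd fuel chars k ≤ chars.length := by
  induction fuel with
  | zero => intro chars k h; simpa [gnsDigitEnd] using h
  | succ fuel ih =>
    intro chars k h
    rw [gnsDigitEnd]
    by_cases hk : k < chars.length
    · by_cases hd : PySem.Chars.isdigit (chars[k]'hk)
      · simp only [hk, dite_true, hd, if_true]
        exact ih chars (k + 1) (by omega)
      · simp [hk, hd]; omega
    · simp [hk]; omega

theorem gnsDigitEnd_digits (fuel : Nat) : ∀ (chars : List Char) (k : Nat),
    ∀ m, k ≤ m → m < gnsDigitEnd fuel chars k →
      ∃ h : m < chars.length, PySem.Chars.isdigit (chars[m]'h) := by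
  induction fuel with
  | zero => intro chars k m h1 h2; rw [gnsDigitEnd] at h2; omega
  | succ fuel ih =>
    intro chars k m h1 h2
    rw [gnsDigitEnd] at h2
    by_cases hk : k < chars.length
    · by_cases hd : PySem.Chars.isdigit (chars[k]'hk)
      · simp only [hk, dite_true, hd, if_true] at h2
        rcases Nat.eq_or_lt_of_le h1 with rfl | hlt
        · exact ⟨hk, hd⟩
        · exact ih chars (k + 1) m hlt h2
      · simp [hk, hd] at h2; omega
    · simp [hk] at h2; omega

theorem gnsDigitEnd_stop (fuel : Nat) : ∀ (chars : List Char) (k : Nat),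
    chars.length ≤ k + fuel →
    ∀ h : gnsDigitEnd fuel chars k < chars.length,
    ¬ PySem.Chars.isdigit (chars[gnsDigitEnd fuel chars k]'h) := by
  induction fuel with
  | zero =>
    intro chars k hfk h
    rw [gnsDigitEnd] at h
    omega
  | succ fuel ih =>
    intro chars k hfk h
    by_cases hk : k < chars.length
    · by_cases hd : PySem.Chars.isdigit (chars[k]'hk)
      · have he : gnsDigitEnd (fuel + 1) chars k = gnsDigitEnd fuel chars (k + 1) := by
          rw [gnsDigitEnd]; simp [hk, hd]
        revert h
        rw [he]
        exact ih chars (k + 1) (by omega)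
      · have he : gnsDigitEnd (fuel + 1) chars k = k := by
          rw [gnsDigitEnd]; simp [hk, hd]
        revert h
        rw [he]
        intro h
        exact hd
    · have he : gnsDigitEnd (fuel + 1) chars k = k := by
        rw [gnsDigitEnd]; simp [hk]
      revert h
      rw [he]
      omega

-- collecting a digit run just extends the pending number
theorem pendScan_digits (r : List Char) :
    ∀ (rest : List Char) (pos : Int) (num : List Char),
    (∀ c ∈ r, PySem.Chars.isdigit c) →
    pendScan (r ++ rest) pos num = pendScan rest (pos + (r.length : Int)) (num ++ r) := by
  induction r with
  | nil => intro rest pos num _; simp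
  | cons c r ih =>
    intro rest pos num hall
    have hd : PySem.Chars.isdigit c := hall c (by simp)
    simp only [List.cons_append, pendScan, hd, if_true]
    rw [ih rest (pos + 1) (num ++ [c]) (fun x hx => hall x (by simp [hx]))]
    rw [show (pos + 1) + (r.length : Int) = pos + ((c :: r).length : Int) by
      simp [List.length_cons]; push_cast; ring]
    rw [show (num ++ [c]) ++ r = num ++ (c :: r) by simp]

-- flushing a nonempty pending number before a non-digit (or before the end)
theorem pendScan_flush (rest : List Char) (pos : Int) (num : List Char)
    (hnum : num.length > 0)
    (hhead : ∀ c, rest.head? = some c → ¬ PySem.Chars.isdigit c) :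
    pendScan rest pos num =
      (String.mk num :: (pendScan rest pos []).1,
       (pos - (num.length : Int)) :: (pendScan rest pos []).2.1,
       (pendScan rest pos []).2.2) := by
  rcases rest with _ | ⟨c, t⟩
  · simp [pendScan, hnum]
  · have hd : ¬ PySem.Chars.isdigit c := hhead c rfl
    by_cases hc : c = '.'
    · subst hc; simp [pendScan, hd, hnum]
    · simp [pendScan, hd, hnum, hc]

-- Source B's scanner equals the reference scanner with an empty pending number
theorem gnsGo_eq_pendScan (chars : List Char) (fuel : Nat) :
    ∀ i : Nat, chars.length ≤ i + fuel →
    gnsGo fuel chars i = pendScan (chars.drop i) (i : Int) [] := by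
  induction fuel with
  | zero =>
    intro i hi
    rw [List.drop_eq_nil_of_le (by omega)]
    simp [gnsGo, pendScan]
  | succ fuel ihd =>
    intro i hi
    by_cases hlt : i < chars.length
    · by_cases hd : PySem.Chars.isdigit (chars[i]'hlt)
      · rw [gnsGo]
        simp only [hlt, dite_true, hd, if_true]
        set j := gnsDigitEnd (chars.length - i) chars i with hjdef
        have hjgt : i < j := gnsDigitEnd_gt (chars.length - i) chars i hlt hd (by omega)
        have hjle : j ≤ chars.length := gnsDigitEnd_le (chars.length - i) chars i (by omega)
        set r := (chars.drop i).take (j - i) with hrdef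
        have hrlen : r.length = j - i := by
          simp [hrdef]; omega
        have hsplit : chars.drop i = r ++ chars.drop j := by
          rw [hrdef]
          conv_lhs => rw [← List.take_append_drop (j - i) (chars.drop i)]
          congr 1
          rw [List.drop_drop]
          congr 1; omega
        have hrdigits : ∀ c ∈ r, PySem.Chars.isdigit c := by
          intro c hc
          rw [hrdef] at hc
          obtain ⟨m, hm, rfl⟩ := List.mem_iff_getElem.mp hc
          have hm2 : m < j - i := by
            have := List.length_take_le (j - i) (chars.drop i); omega
          rw [List.getElem_take, List.getElem_drop]
          obtain ⟨h1, h2⟩ := gnsDigitEnd_digits (chars.length - i) chars i (i + m)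
            (by omega) (by omega)
          exact h2
        have hrlen0 : r.length > 0 := by omega
        rw [hsplit, pendScan_digits r (chars.drop j) (i : Int) [] hrdigits]
        rw [List.nil_append]
        rw [pendScan_flush (chars.drop j) ((i : Int) + (r.length : Int)) r hrlen0
          (by
            intro c hcd
            rcases Nat.lt_or_ge j chars.length with hjl | hjg
            · rw [List.drop_eq_getElem_cons hjl, List.head?_cons] at hcd
              have hcj := Option.some.inj hcd
              rw [← hcj]
              exact gnsDigitEnd_stop (chars.length - i) chars i (by omega) hjl
            · rw [List.drop_eq_nil_of_le hjg] at hcd; simp at hcd)]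
        rw [ihd j (by omega)]
        have h1 : (i : Int) + (r.length : Int) = (j : Int) := by omega
        simp [h1]
        omega
      · rw [gnsGo]
        simp only [hlt, dite_true, hd, if_false]
        rw [List.drop_eq_getElem_cons hlt]
        have ih := ihd (i + 1) (by omega)
        have hi1 : ((i : Int) + 1) = ((i + 1 : Nat) : Int) := by push_cast; ring
        by_cases hc : chars[i]'hlt = '.'
        · rw [hc]
          simp [pendScan]
          rw [hi1]
          exact ih
        · simp only [pendScan, hd, Bool.false_eq_true, if_false]
          rw [hi1, ← ih]
          simp [hc]
    · rw [gnsGo]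
      simp only [hlt, dite_false]
      rw [List.drop_eq_nil_of_le (by omega)]
      simp [pendScan]

-- the materialized character list is the prefix of the line
theorem chars_eq_take (L : Int) (cs : List Char) (h0 : 0 ≤ L) (hL : L ≤ (cs.length : Int)) :
    (PySem.List.pyRange 0 L 1).map (fun i => (PySem.List.pyGet? cs i).getD ' ') =
      cs.take L.toNat := by
  have hlen : L.toNat ≤ cs.length := by omega
  rw [PySem.List.pyRange_one, List.map_map]
  apply List.ext_getElem
  · rw [List.length_map, List.length_range, List.length_take]
    omega
  · intro m h1 h2
    simp only [List.getElem_map, List.getElem_range, Function.comp_apply, List.getElem_take]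
    have hm : m < L.toNat := by
      rw [List.length_map, List.length_range] at h1; omega
    rw [show ((0 : Int) + (m : Nat)) = ((m : Nat) : Int) by ring]
    rw [PySem.List.pyGet?_natCast]
    simp [List.getElem?_eq_getElem (show m < cs.length by omega)]

-- ===== VERDICT (by name: the statement is the Claim_ definition above) =====
theorem get_numbers_and_symbols_spec : Claim_equal_get_numbers_and_symbols := by
  intro L line _ hpre
  unfold Spec_get_numbers_and_symbols
  unfold Pre_get_numbers_and_symbols at hpre
  set cs := line.toList with hcs
  rcases Int.lt_or_le L 0 with hneg | hpos
  · unfold get_numbers_and_symbols get_numbers_and_symbols_alt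
    rw [PySem.List.pyRange_one_eq_nil (by omega)]
    simp [gnsGo]
  · unfold get_numbers_and_symbols get_numbers_and_symbols_alt
    rw [chars_eq_take L cs hpos hpre]
    rw [show (0 : Int) = ((0 : Nat) : Int) from rfl]
    rw [foldl_eq_foldASuf L cs hpre L.toNat 0 ([], [], [], []) (by omega)]
    rw [gnsGo_eq_pendScan (cs.take L.toNat) (cs.take L.toNat).length 0 (by omega)]
    have hsuflen : (((cs.take L.toNat).length : Nat) : Int) = L := by
      rw [List.length_take]; omega
    have hmain := foldASuf_eq_pendScan L ((cs.take L.toNat).drop 0) ((0 : Nat) : Int) [] [] [] []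
      (by rw [List.drop_zero]; rw [Nat.cast_zero, zero_add]; exact hsuflen) (fun h => rfl)
    simp only [List.drop_zero] at hmain ⊢
    rw [hmain]
    simp
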